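-- pv_equiv track=rewrite | github.com/finot05/dsa-submissions | A2SV G6 - Round #3 05-Mar-2025/C - Minimal TV Subscriptions 292649.py | min_tv_sub
-- ===== SOURCE A (Python) =====
-- from collections import Counter
--
-- def min_tv_sub(n, k, d, a):
--     sub_arr = Counter(a[:d])
--     res = len(sub_arr)
--     for i in range(d, n):
--         sub_arr[a[i]] += 1
--         if sub_arr[a[i - d]] > 0:
--             sub_arr[a[i - d]] -= 1
--         if sub_arr[a[i - d]] == 0:
--             del sub_arr[a[i - d]]
--         res = min(res, len(sub_arr))
--     return res
-- ===== SOURCE B (Python) =====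
-- def min_tv_sub(n, k, d, a):
--     res = len(set(a[:d]))
--     for i in range(d, n):
--         res = min(res, len(set(a[i - d + 1:i + 1])))
--     return res
-- ===== Notes on version B (the rewrite author's own statement) =====
-- stated objective: simpler
-- what changed: Replaces A's incremental Counter with add/decrement/delete-on-zero bookkeeping by recomputing each window's distinct count from scratch with set(), keeping A's first-window-then-loop control shape.
-- outside the precondition, e.g. on min_tv_sub(2, 0, -1, [3, 1, 2]): A returns 2, B returns 0
import Mathlib
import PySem

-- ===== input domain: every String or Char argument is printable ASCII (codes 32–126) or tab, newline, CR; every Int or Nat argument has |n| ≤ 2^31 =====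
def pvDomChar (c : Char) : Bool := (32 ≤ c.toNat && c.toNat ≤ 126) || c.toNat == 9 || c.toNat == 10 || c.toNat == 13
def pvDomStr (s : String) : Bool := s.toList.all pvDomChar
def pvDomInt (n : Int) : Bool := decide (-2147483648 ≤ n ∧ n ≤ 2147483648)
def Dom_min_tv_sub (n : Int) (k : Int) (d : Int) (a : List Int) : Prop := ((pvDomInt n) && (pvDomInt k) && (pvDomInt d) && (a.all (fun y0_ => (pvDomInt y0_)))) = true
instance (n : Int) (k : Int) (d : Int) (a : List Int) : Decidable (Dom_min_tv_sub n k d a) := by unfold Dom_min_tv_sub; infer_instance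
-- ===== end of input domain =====

-- B replaces A's incremental Counter bookkeeping by recomputing each window's
-- distinct count from scratch with set() — simpler, not faster (objective: simpler).

-- ===== PORT A =====
-- Loop body of A, named so the proofs can speak about one iteration; 'del' is
-- Dict.erase (Python's del would raise KeyError on a missing key, which cannot
-- happen under Pre_: the decremented key is always present).
def aStep (a : List Int) (d : Int) (st : PySem.Dict Int Int × Int) (i : Int) :
    PySem.Dict Int Int × Int :=
  let s1 := st.1.modify (PySem.List.pyGetD a i 0) 0 (· + 1)
  let aj := PySem.List.pyGetD a (i - d) 0
  let s2 := if 0 < s1.getD aj 0 then s1.modify aj 0 (· - 1) else s1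
  let s3 := if s2.getD aj 0 == 0 then s2.erase aj else s2
  (s3, min st.2 (s3.size : Int))

def min_tv_sub (n : Int) (k : Int) (d : Int) (a : List Int) : Int :=
  let sub0 : PySem.Dict Int Int := PySem.Dict.counter (PySem.List.slice a none (some d))
  ((PySem.List.pyRange d n).foldl (aStep a d) (sub0, (sub0.size : Int))).2

-- ===== PORT B =====
-- Loop body of B: recompute the window's distinct count with set().
def bStep (a : List Int) (d : Int) (res : Int) (i : Int) : Int :=
  min res ((PySem.Set.ofList (PySem.List.slice a (some (i - d + 1)) (some (i + 1)))).length : Int)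

def min_tv_sub_alt (n : Int) (k : Int) (d : Int) (a : List Int) : Int :=
  let res0 : Int := (PySem.Set.ofList (PySem.List.slice a none (some d))).length
  (PySem.List.pyRange d n).foldl (bStep a d) res0

-- ===== PRECONDITION & SPEC =====
-- Pre_ excludes (a) n > len(a) with d < n, where A raises IndexError, and
-- (b) negative d with a nonempty loop range, where A either raises IndexError or
-- returns a count of an accidental negative-index-wraparound window.
def Pre_min_tv_sub (n : Int) (k : Int) (d : Int) (a : List Int) : Prop :=
  (0 ≤ d ∧ n ≤ (a.length : Int)) ∨ n ≤ d
instance (n : Int) (k : Int) (d : Int) (a : List Int) : Decidable (Pre_min_tv_sub n k d a) := by unfold Pre_min_tv_sub; infer_instance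

def pvWitness_min_tv_sub : Int × Int × Int × List Int := (3, 0, 2, [1, 2, 2])

def Spec_min_tv_sub (n : Int) (k : Int) (d : Int) (a : List Int) (out : Int) : Prop := out = min_tv_sub_alt n k d a
instance (n : Int) (k : Int) (d : Int) (a : List Int) (out : Int) : Decidable (Spec_min_tv_sub n k d a out) := by unfold Spec_min_tv_sub; infer_instance

-- ===== CLAIM (what is proved, stated in full; the proofs are below) =====
def Claim_equal_min_tv_sub : Prop := ∀ (n : Int) (k : Int) (d : Int) (a : List Int), Dom_min_tv_sub n k d a → Pre_min_tv_sub n k d a → Spec_min_tv_sub n k d a (min_tv_sub n k d a)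

-- ===== LEMMAS AND PROOFS =====

-- Invariant tying A's Counter to the current window w.
def DictInv (sub : PySem.Dict Int Int) (w : List Int) : Prop :=
  sub.keys.Nodup ∧ (∀ x, sub.getD x 0 = (w.count x : Int)) ∧
    (∀ x, sub.contains x = true ↔ x ∈ w)

-- erase lemmas (not in the PySem list): proved from erase's definition as a filter.
theorem find?_filter_ne (items : List (Int × Int)) (k z : Int) :
    List.find? (fun p => p.1 == z) (items.filter (fun p => !(p.1 == k)))
      = if z = k then none else List.find? (fun p => p.1 == z) items := by
  induction items with
  | nil => by_cases hz : z = k <;> simp [hz]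
  | cons p rest ih =>
    by_cases hpk : p.1 = k <;> by_cases hpz : p.1 = z <;> simp_all

theorem dict_get?_erase (d : PySem.Dict Int Int) (k z : Int) :
    (d.erase k).get? z = if z = k then none else d.get? z := by
  rcases d with ⟨items⟩
  show (List.find? (fun p => p.1 == z) (items.filter (fun p => !(p.1 == k)))).map (·.2)
      = if z = k then none else (List.find? (fun p => p.1 == z) items).map (·.2)
  rw [find?_filter_ne]
  by_cases hz : z = k <;> simp [hz]

theorem dict_contains_erase (d : PySem.Dict Int Int) (k z : Int) :
    (d.erase k).contains z = (decide (z ≠ k) && d.contains z) := by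
  have h := dict_get?_erase d k z
  rw [PySem.Dict.contains_eq_isSome_get?, PySem.Dict.contains_eq_isSome_get?, h]
  by_cases hz : z = k <;> simp [hz]

theorem dict_getD_erase (d : PySem.Dict Int Int) (k z : Int) :
    (d.erase k).getD z 0 = if z = k then 0 else d.getD z 0 := by
  rw [PySem.Dict.getD_eq_get?_getD, dict_get?_erase]
  by_cases hz : z = k <;> simp [hz, PySem.Dict.getD_eq_get?_getD]

theorem dict_nodup_keys_erase (d : PySem.Dict Int Int) (k : Int)
    (h : d.keys.Nodup) : (d.erase k).keys.Nodup := by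
  rcases d with ⟨items⟩
  have hsub : (List.filter (fun p => !p.1 == k) items).Sublist items := List.filter_sublist
  exact List.Nodup.sublist (hsub.map Prod.fst) h

theorem dict_nodup_keys_modify (d : PySem.Dict Int Int) (k : Int) (d0 : Int)
    (f : Int → Int) (h : d.keys.Nodup) : (d.modify k d0 f).keys.Nodup :=
  PySem.Dict.nodup_keys_insert d k _ h

-- number of entries of a dict satisfying the invariant = distinct count of the window
theorem size_of_inv (sub : PySem.Dict Int Int) (w : List Int) (h : DictInv sub w) :
    sub.size = (PySem.Set.ofList w).length := by
  obtain ⟨hnd, _, hmem⟩ := h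
  have hk : ∀ x, x ∈ sub.keys ↔ x ∈ PySem.Set.ofList w := by
    intro x
    rw [← PySem.Dict.contains_iff_mem_keys, hmem, PySem.Set.mem_ofList]
  have hcard : sub.keys.toFinset = (PySem.Set.ofList w).toFinset := by
    ext x; simp [hk]
  have h1 := List.toFinset_card_of_nodup hnd
  have h2 := List.toFinset_card_of_nodup (PySem.Set.nodup_ofList w)
  have : sub.keys.length = (PySem.Set.ofList w).length := by
    rw [← h1, ← h2, hcard]
  simpa [PySem.Dict.size, PySem.Dict.keys] using this

theorem inv_counter (xs : List Int) : DictInv (PySem.Dict.counter xs) xs := by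
  refine ⟨PySem.Dict.nodup_keys_counter xs, ?_, ?_⟩
  · intro x; exact PySem.Dict.getD_counter xs x
  · intro x; rw [PySem.Dict.contains_counter]; simp

-- the dict part of one A-loop body step, as a function of the incoming element x
-- and the outgoing element y
def stepDict (x y : Int) (sub : PySem.Dict Int Int) : PySem.Dict Int Int :=
  let s1 := sub.modify x 0 (· + 1)
  let s2 := if 0 < s1.getD y 0 then s1.modify y 0 (· - 1) else s1
  if s2.getD y 0 == 0 then s2.erase y else s2

theorem aStep_eq (a : List Int) (d : Int) (st : PySem.Dict Int Int × Int) (i : Int) :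
    aStep a d st i
      = (stepDict (PySem.List.pyGetD a i 0) (PySem.List.pyGetD a (i - d) 0) st.1,
         min st.2 ((stepDict (PySem.List.pyGetD a i 0) (PySem.List.pyGetD a (i - d) 0) st.1).size : Int)) :=
  rfl

-- one A-loop body step preserves the invariant: old window w, incoming element x,
-- outgoing element y, new window w', related by w ++ [x] = y :: w'.
theorem step_inv (sub : PySem.Dict Int Int) (w w' : List Int) (x y : Int)
    (hInv : DictInv sub w) (hw : w ++ [x] = y :: w') :
    DictInv (stepDict x y sub) w' := by
  obtain ⟨hnd, hcnt, hmem⟩ := hInv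
  unfold stepDict
  dsimp only
  have h1cnt : ∀ z, (sub.modify x 0 (· + 1)).getD z 0 = ((y :: w').count z : Int) := by
    intro z
    rw [PySem.Dict.getD_modify, ← hw]
    by_cases hz : z = x <;> simp [hz, hcnt, List.count_append, List.count_cons] <;> omega
  have h1mem : ∀ z, (sub.modify x 0 (· + 1)).contains z = true ↔ z ∈ y :: w' := by
    intro z
    rw [PySem.Dict.contains_modify, ← hw]
    by_cases hz : z = x <;> simp [hz, hmem]
  have h1nd := dict_nodup_keys_modify sub x 0 (· + 1) hnd
  set s1 := sub.modify x 0 (· + 1) with hs1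
  have hy : 0 < s1.getD y 0 := by
    rw [h1cnt]
    have : 0 < (y :: w').count y := List.count_pos_iff.mpr (List.mem_cons_self)
    exact_mod_cast this
  rw [if_pos hy]
  set s2 := s1.modify y 0 (· - 1) with hs2
  have h2cnt : ∀ z, s2.getD z 0 = (w'.count z : Int) := by
    intro z
    rw [hs2, PySem.Dict.getD_modify]
    by_cases hz : z = y <;> simp [hz, h1cnt, List.count_cons] <;> omega
  have h2mem : ∀ z, s2.contains z = true ↔ z ∈ y :: w' := by
    intro z
    rw [hs2, PySem.Dict.contains_modify]
    by_cases hz : z = y <;> simp [hz, h1mem]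
  have h2nd := dict_nodup_keys_modify s1 y 0 (· - 1) h1nd
  by_cases h0 : s2.getD y 0 == 0
  · -- y's count dropped to 0: deleted; y ∉ w'
    rw [if_pos h0]
    have hy0 : w'.count y = 0 := by
      have hc := h2cnt y
      rw [beq_iff_eq] at h0
      have : (w'.count y : Int) = 0 := by rw [← hc, h0]
      exact_mod_cast this
    refine ⟨dict_nodup_keys_erase s2 y h2nd, ?_, ?_⟩
    · intro z
      rw [dict_getD_erase]
      by_cases hz : z = y
      · simp [hz, hy0]
      · simp [hz, h2cnt]
    · intro z
      rw [dict_contains_erase]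
      by_cases hz : z = y
      · subst hz
        simp [List.count_eq_zero.mp hy0]
      · have hzz : s2.contains z = true ↔ z ∈ w' := by
          rw [h2mem z, List.mem_cons]
          constructor
          · rintro (rfl | h)
            · exact absurd rfl hz
            · exact h
          · exact Or.inr
        simp [hz, hzz]
  · -- y still in the window
    rw [if_neg h0]
    have hy1 : y ∈ w' := by
      have hc := h2cnt y
      rw [beq_iff_eq] at h0
      have : w'.count y ≠ 0 := by
        intro h
        rw [h] at hc
        simp at hc
        exact h0 hc
      exact List.count_pos_iff.mp (Nat.pos_of_ne_zero this)
    refine ⟨h2nd, h2cnt, ?_⟩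
    intro z
    rw [h2mem z, List.mem_cons]
    constructor
    · rintro (rfl | h)
      · exact hy1
      · exact h
    · exact Or.inr

-- splitting one window step: (take (D+1) of drop p) both as w ++ [x] and y :: w'
theorem window_step (a : List Int) (p D : Nat) (h : p + D < a.length) :
    (a.drop p).take D ++ [a[p + D]] = a[p] :: (a.drop (p + 1)).take D := by
  have h1 : (a.drop p).take (D + 1) = (a.drop p).take D ++ [a[p + D]] := by
    rw [List.take_succ]
    have : (a.drop p)[D]? = some a[p + D] := by
      rw [List.getElem?_drop]
      exact List.getElem?_eq_getElem (by omega)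
    simp [this]
  have h2 : a.drop p = a[p] :: a.drop (p + 1) :=
    List.drop_eq_getElem_cons (by omega)
  rw [← h1, h2, List.take_succ_cons]

-- the main loop simulation
theorem loop_eq (a : List Int) (d : Int) (hd : 0 ≤ d) :
    ∀ (m : Nat) (i n : Int) (sub : PySem.Dict Int Int) (r : Int),
    n ≤ (a.length : Int) → d ≤ i → i + m = n →
    DictInv sub (PySem.List.slice a (some (i - d)) (some i)) →
    ((PySem.List.pyRange i n).foldl (aStep a d) (sub, r)).2
      = (PySem.List.pyRange i n).foldl (bStep a d) r := by
  intro m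
  induction m with
  | zero =>
    intro i n sub r _ _ him _
    rw [PySem.List.pyRange_one_eq_nil (by omega)]
    rfl
  | succ m ih =>
    intro i n sub r hn hdi him hInv
    have hin : i < n := by omega
    rw [PySem.List.pyRange_one_cons hin]
    simp only [List.foldl_cons, aStep_eq, bStep]
    have h0i : 0 ≤ i := le_trans hd hdi
    have hil : i < (a.length : Int) := lt_of_lt_of_le hin hn
    have hx : PySem.List.pyGetD a i 0 = a[i.toNat]'(by omega) :=
      PySem.List.pyGetD_eq_getElem a 0 h0i hil
    have hy : PySem.List.pyGetD a (i - d) 0 = a[(i - d).toNat]'(by omega) :=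
      PySem.List.pyGetD_eq_getElem a 0 (by omega) (by omega)
    have hw : PySem.List.slice a (some (i - d)) (some i)
        = (a.drop (i - d).toNat).take d.toNat := by
      rw [PySem.List.slice_toNat a (by omega) h0i]
      congr 1
      omega
    have hw' : PySem.List.slice a (some (i - d + 1)) (some (i + 1))
        = (a.drop ((i - d).toNat + 1)).take d.toNat := by
      rw [PySem.List.slice_toNat a (by omega) (by omega)]
      have e1 : (i - d + 1).toNat = (i - d).toNat + 1 := by omega
      have e2 : (i + 1).toNat - ((i - d).toNat + 1) = d.toNat := by omega
      rw [e1, e2]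
    have hpD : (i - d).toNat + d.toNat = i.toNat := by omega
    have hsplit : (a.drop (i - d).toNat).take d.toNat ++ [a[i.toNat]'(by omega)]
        = a[(i - d).toNat]'(by omega) :: (a.drop ((i - d).toNat + 1)).take d.toNat := by
      have := window_step a (i - d).toNat d.toNat (by omega)
      simpa [hpD] using this
    rw [hw] at hInv
    rw [hx, hy]
    have hstep := step_inv sub ((a.drop (i - d).toNat).take d.toNat)
      ((a.drop ((i - d).toNat + 1)).take d.toNat)
      (a[i.toNat]'(by omega)) (a[(i - d).toNat]'(by omega)) hInv hsplit
    have hsz : ((stepDict (a[i.toNat]'(by omega)) (a[(i - d).toNat]'(by omega)) sub).size : Int)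
        = ((PySem.Set.ofList (PySem.List.slice a (some (i - d + 1)) (some (i + 1)))).length : Int) := by
      rw [hw']
      exact_mod_cast size_of_inv _ _ hstep
    have hInv' : DictInv (stepDict (a[i.toNat]'(by omega)) (a[(i - d).toNat]'(by omega)) sub)
        (PySem.List.slice a (some (i + 1 - d)) (some (i + 1))) := by
      have heq : i + 1 - d = i - d + 1 := by ring
      rw [heq, hw']
      exact hstep
    rw [ih (i + 1) n _ (min r ((stepDict (a[i.toNat]'(by omega)) (a[(i - d).toNat]'(by omega)) sub).size : Int))
        hn (by omega) (by omega) hInv', hsz]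

-- ===== VERDICT (by name: the statement is the Claim_ definition above) =====
theorem min_tv_sub_spec : Claim_equal_min_tv_sub := by
  intro n k d a _ hpre
  unfold Spec_min_tv_sub
  show min_tv_sub n k d a = min_tv_sub_alt n k d a
  simp only [min_tv_sub, min_tv_sub_alt]
  by_cases hnd : n ≤ d
  · rw [PySem.List.pyRange_one_eq_nil hnd]
    simp only [List.foldl_nil]
    exact_mod_cast size_of_inv _ _ (inv_counter _)
  · obtain ⟨hd, hn⟩ | h := hpre
    · have hInit : DictInv (PySem.Dict.counter (PySem.List.slice a none (some d)))
          (PySem.List.slice a (some (d - d)) (some d)) := by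
        have heq : PySem.List.slice a (some (d - d)) (some d)
            = PySem.List.slice a none (some d) := by
          have h00 : d - d = (0 : Int) := by ring
          rw [h00, PySem.List.slice_zero_start]
        rw [heq]
        exact inv_counter _
      have h0 := size_of_inv _ _ (inv_counter (PySem.List.slice a none (some d)))
      rw [loop_eq a d hd (n - d).toNat d n
        (PySem.Dict.counter (PySem.List.slice a none (some d)))
        ((PySem.Dict.counter (PySem.List.slice a none (some d))).size : Int)
        hn le_rfl (by omega) hInit, h0]
    · omega
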